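-- pv_equiv track=rewrite | github.com/Aurdeegz/peaksequences | peak_region_fasta_and_binding.py | check_motif_lengths
-- ===== SOURCE A (Python) =====
-- def check_motif_lengths(motifs_list):
--     """
--     Given a list of (motif, strand) tuples, check the length of the motifs
--     and partition them based on their lengths
--     """
--     # Initialize the dictionary to hold partitions
--     motifs_dict = {}
--     # Loop over the motifs in the motif list
--     for motif in motifs_list:
--         # Check to see if the motif length is in the motifs_dict key
--         # values already. If not
--         if f"{len(motif[0])}" not in motifs_dict.keys():
--             # Then initialize the motifs dictionary with this key
--             # and a list as the value
--             motifs_dict[f'{len(motif[0])}'] = [motif]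
--         # If the length of the motif is already a key in the dictionary
--         else:
--             # Then simply update the list with this sequence
--             motifs_dict[f'{len(motif[0])}'].append(motif)
--     # Once the loop is completed, return the motifs dictionary.
--     return motifs_dict
-- ===== SOURCE B (Python) =====
-- def check_motif_lengths(motifs_list):
--     """
--     Given a list of (motif, strand) tuples, check the length of the motifs
--     and partition them based on their lengths.
--
--     Two-pass strategy: first collect the distinct length keys in order of
--     first appearance, then build the dictionary in one comprehension,
--     selecting each key's motifs with a filter pass over the input.
--     """
--     keys = []
--     for motif in motifs_list:
--         k = f"{len(motif[0])}"
--         if k not in keys: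
--             keys.append(k)
--     return {k: [m for m in motifs_list if f"{len(m[0])}" == k] for k in keys}
-- ===== Notes on version B (the rewrite author's own statement) =====
-- stated objective: alternative
-- what changed: Replaces the incremental dict accumulation (lookup-then-insert-or-append per element) by a two-pass scheme: collect the distinct length keys in first-appearance order, then build the dict with one filter pass over the whole input per key.
import Mathlib
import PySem

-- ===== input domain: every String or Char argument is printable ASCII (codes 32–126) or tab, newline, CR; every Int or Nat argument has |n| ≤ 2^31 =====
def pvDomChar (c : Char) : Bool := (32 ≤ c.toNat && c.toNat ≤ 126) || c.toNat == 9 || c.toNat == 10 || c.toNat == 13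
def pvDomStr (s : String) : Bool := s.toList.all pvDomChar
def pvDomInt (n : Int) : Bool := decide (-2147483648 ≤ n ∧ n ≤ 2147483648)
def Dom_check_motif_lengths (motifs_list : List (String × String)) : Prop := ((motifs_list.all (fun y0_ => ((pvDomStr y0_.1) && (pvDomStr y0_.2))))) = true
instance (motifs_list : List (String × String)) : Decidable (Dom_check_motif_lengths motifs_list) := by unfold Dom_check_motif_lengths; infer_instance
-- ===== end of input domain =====

-- B replaces A's incremental dict accumulation by a two-pass scheme (distinct keys first,
-- then one filter per key); a structural alternative of similar cost, not faster.


-- ===== PORT A =====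
-- f"{len(motif[0])}" — shared by both ports (the same f-string appears in both Pythons)
def pvKey (m : String × String) : String := PySem.Int.toStr (PySem.Str.len m.1)

-- loop body of A: "if key not in motifs_dict.keys(): d[key] = [motif] else: d[key].append(motif)"
-- (the append branch reads d[key], present in that branch; getD [] is the total form of that read)
def pvStepA (d : PySem.Dict String (List (String × String))) (m : String × String) :
    PySem.Dict String (List (String × String)) :=
  if d.contains (pvKey m) = false then d.insert (pvKey m) [m]
  else d.insert (pvKey m) (d.getD (pvKey m) [] ++ [m])

def check_motif_lengths (motifs_list : List (String × String)) : List (String × List (String × String)) :=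
  (motifs_list.foldl pvStepA PySem.Dict.empty).items

-- ===== PORT B =====
def check_motif_lengths_alt (motifs_list : List (String × String)) : List (String × List (String × String)) :=
  let keys := motifs_list.foldl (fun ks m => if ks.contains (pvKey m) then ks else ks ++ [pvKey m]) []
  keys.map (fun k => (k, motifs_list.filter (fun m => pvKey m == k)))

-- ===== PRECONDITION & SPEC =====
def Spec_check_motif_lengths (motifs_list : List (String × String)) (out : List (String × List (String × String))) : Prop := out = check_motif_lengths_alt motifs_list
instance (motifs_list : List (String × String)) (out : List (String × List (String × String))) : Decidable (Spec_check_motif_lengths motifs_list out) := by unfold Spec_check_motif_lengths; infer_instance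

-- ===== CLAIM (what is proved, stated in full; the proofs are below) =====
def Claim_equal_check_motif_lengths : Prop := ∀ (motifs_list : List (String × String)), Dom_check_motif_lengths motifs_list → Spec_check_motif_lengths motifs_list (check_motif_lengths motifs_list)

-- ===== LEMMAS AND PROOFS =====

-- B's key-collecting loop is exactly ordered dedup of the keys
lemma pv_keys_eq (ml : List (String × String)) :
    ml.foldl (fun ks m => if ks.contains (pvKey m) then ks else ks ++ [pvKey m]) []
      = PySem.Set.ofList (ml.map pvKey) := by
  rw [PySem.Set.ofList, List.foldl_map]
  rfl

-- main invariant: A's fold over any list has exactly B's items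
lemma pv_main (ml : List (String × String)) :
    (ml.foldl pvStepA PySem.Dict.empty).items
      = (PySem.Set.ofList (ml.map pvKey)).map
          (fun k => (k, ml.filter (fun m => pvKey m == k))) := by
  induction ml using List.reverseRecOn with
  | nil => rfl
  | append_singleton xs m ih =>
    have hkeys : (xs.foldl pvStepA PySem.Dict.empty).keys = PySem.Set.ofList (xs.map pvKey) := by
      show (xs.foldl pvStepA PySem.Dict.empty).items.map Prod.fst = _
      rw [ih, List.map_map]
      simp [Function.comp_def]
    have hnd : (PySem.Set.ofList (xs.map pvKey)).Nodup := PySem.Set.nodup_ofList _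
    have hof : PySem.Set.ofList ((xs ++ [m]).map pvKey)
        = PySem.Set.add (PySem.Set.ofList (xs.map pvKey)) (pvKey m) := by
      rw [List.map_append, PySem.Set.ofList, List.foldl_append]
      rfl
    rw [List.foldl_append, List.foldl_cons, List.foldl_nil, hof]
    by_cases hmem : pvKey m ∈ PySem.Set.ofList (xs.map pvKey)
    · -- key already present: A overwrites in place, B's key list is unchanged
      have hc : (xs.foldl pvStepA PySem.Dict.empty).contains (pvKey m) = true := by
        rw [PySem.Dict.contains_iff_mem_keys, hkeys]; exact hmem
      have hget : (xs.foldl pvStepA PySem.Dict.empty).getD (pvKey m) []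
          = xs.filter (fun m' => pvKey m' == pvKey m) := by
        apply PySem.Dict.getD_of_mem_items
        · rw [ih]; exact List.mem_map.2 ⟨pvKey m, hmem, rfl⟩
        · rw [hkeys]; exact hnd
      have hadd : PySem.Set.add (PySem.Set.ofList (xs.map pvKey)) (pvKey m)
          = PySem.Set.ofList (xs.map pvKey) := by
        simp only [PySem.Set.add, (PySem.Set.contains_iff _ (pvKey m)).2 hmem, if_true]
      rw [pvStepA, hc, if_neg (by simp)]
      rw [PySem.Dict.items_insert_of_contains _ _ hc, ih, hget, hadd, List.map_map]
      apply List.map_congr_left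
      intro k _
      by_cases hk : k = pvKey m
      · subst hk
        simp [List.filter_append]
      · have h2 : (pvKey m == k) = false := by simp [Ne.symm hk]
        simp [List.filter_append, h2, hk]
    · -- fresh key: A appends a new entry, B's key list grows by one
      have hc : (xs.foldl pvStepA PySem.Dict.empty).contains (pvKey m) = false := by
        rw [Bool.eq_false_iff, Ne, PySem.Dict.contains_iff_mem_keys, hkeys]
        exact hmem
      have hadd : PySem.Set.add (PySem.Set.ofList (xs.map pvKey)) (pvKey m)
          = PySem.Set.ofList (xs.map pvKey) ++ [pvKey m] := by
        have hcf : (PySem.Set.ofList (xs.map pvKey)).contains (pvKey m) = false := by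
          rw [Bool.eq_false_iff, Ne, PySem.Set.contains_iff]; exact hmem
        simp only [PySem.Set.add, hcf, Bool.false_eq_true, if_false]
      rw [pvStepA, hc, if_pos rfl]
      rw [PySem.Dict.items_insert_of_not_contains _ _ hc, ih, hadd, List.map_append]
      congr 1
      · apply List.map_congr_left
        intro k hk
        have hkm : pvKey m ≠ k := fun h => hmem (h ▸ hk)
        have h2 : (pvKey m == k) = false := by simp [hkm]
        simp [List.filter_append, h2]
      · have hnil : xs.filter (fun m' => pvKey m' == pvKey m) = [] := by
          rw [List.filter_eq_nil_iff]
          intro x hx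
          simp only [beq_iff_eq]
          intro h
          exact hmem ((PySem.Set.mem_ofList _ _).2 (List.mem_map.2 ⟨x, hx, h⟩))
        simp [List.filter_append, hnil]

-- ===== VERDICT (by name: the statement is the Claim_ definition above) =====
theorem check_motif_lengths_spec : Claim_equal_check_motif_lengths := by
  intro ml _
  show check_motif_lengths ml = check_motif_lengths_alt ml
  rw [check_motif_lengths, check_motif_lengths_alt, pv_keys_eq, pv_main]
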